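-- pv_equiv track=rewrite | github.com/aschiedermeier/Programming-Essentials-in-Python | Module_5/5_1_11_11_SudoKu.py | numsInString
-- ===== SOURCE A (Python) =====
-- def numsInString (strng):
--     '''1-9 in string '''
--     nums = "123456789"
--     isin = True # is every digit in string? default yes, unless proven wrong
--     for num in nums:
--         pos = strng.find(num) # find digit in string in position pos
--         if pos == -1: # if digit not in string, proven wrong, break loop
--             isin = False
--             return isin
--     return isin
-- ===== SOURCE B (Python) =====
-- def numsInString(strng):
--     '''1-9 in string'''
--     missing = set("123456789")
--     for ch in strng:
--         missing.discard(ch)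
--         if not missing:
--             return True
--     return False
-- ===== Notes on version B (the rewrite author's own statement) =====
-- stated objective: alternative
-- what changed: Instead of A's loop over the nine digits each re-scanning the whole string with str.find, B makes a single left-to-right pass over the input, discarding each character from a shrinking set of still-missing digits and returning True as soon as that set empties.
import Mathlib
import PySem

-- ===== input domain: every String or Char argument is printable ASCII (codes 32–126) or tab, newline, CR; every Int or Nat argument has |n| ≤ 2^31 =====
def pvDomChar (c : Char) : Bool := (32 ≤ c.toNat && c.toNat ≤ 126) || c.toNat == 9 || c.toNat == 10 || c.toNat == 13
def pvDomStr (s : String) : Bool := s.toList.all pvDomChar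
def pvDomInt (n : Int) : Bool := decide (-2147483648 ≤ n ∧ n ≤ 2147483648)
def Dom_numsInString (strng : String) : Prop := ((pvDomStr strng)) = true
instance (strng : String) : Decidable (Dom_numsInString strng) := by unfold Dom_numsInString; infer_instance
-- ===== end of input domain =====

-- B replaces A's loop over the nine digits (each re-scanning the string with find)
-- by one pass over the string that discards each character from a set of still-missing
-- digits, returning True as soon as it empties (alternative traversal; same cost class).

-- ===== PORT A =====
-- the 'for num in nums' loop with its early 'return False'
def numsInStringGo (strng : String) : List Char → Bool
  | [] => true
  | num :: rest =>
      -- pos = strng.find(num); if pos == -1: return False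
      if PySem.Str.find strng (String.ofList [num]) == -1 then false
      else numsInStringGo strng rest

def numsInString (strng : String) : Bool :=
  numsInStringGo strng "123456789".toList

-- ===== PORT B =====
-- the 'for ch in strng' loop: missing.discard(ch); if not missing: return True
def numsInStringAltGo : List Char → PySem.Set Char → Bool
  | [], _ => false
  | ch :: rest, missing =>
      let m := PySem.Set.discard missing ch
      if m.isEmpty then true else numsInStringAltGo rest m

def numsInString_alt (strng : String) : Bool :=
  numsInStringAltGo strng.toList (PySem.Set.ofList "123456789".toList)

-- ===== PRECONDITION & SPEC =====
def Spec_numsInString (strng : String) (out : Bool) : Prop := out = numsInString_alt strng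
instance (strng : String) (out : Bool) : Decidable (Spec_numsInString strng out) := by unfold Spec_numsInString; infer_instance

-- ===== CLAIM =====
def Claim_equal_numsInString : Prop := ∀ (strng : String), Dom_numsInString strng → Spec_numsInString strng (numsInString strng)

-- ===== LEMMAS AND PROOFS =====
theorem singleton_infix_iff_mem {α : Type} (a : α) (l : List α) : [a] <:+: l ↔ a ∈ l := by
  constructor
  · intro h; exact h.mem (List.mem_singleton_self a)
  · intro h
    obtain ⟨s, t, rfl⟩ := List.append_of_mem h
    exact ⟨s, t, by simp⟩

theorem find_singleton_eq_neg_one (l : List Char) (c : Char) :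
    PySem.Chars.find l [c] = -1 ↔ c ∉ l := by
  rw [PySem.Chars.find_eq_neg_one_iff]
  simp [singleton_infix_iff_mem]

-- A's loop returns true iff every digit occurs in the string
theorem go_eq_all (strng : String) (ds : List Char) :
    numsInStringGo strng ds = ds.all (fun c => decide (c ∈ strng.toList)) := by
  induction ds with
  | nil => rfl
  | cons c rest ih =>
    simp only [numsInStringGo, List.all_cons, ih]
    by_cases h : c ∈ strng.toList
    · have hf : ¬ PySem.Chars.find strng.toList [c] = -1 := by
        rw [find_singleton_eq_neg_one]; simp [h]
      simp [hf, h]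
    · have hf : PySem.Chars.find strng.toList [c] = -1 := by
        rw [find_singleton_eq_neg_one]; exact h
      simp [hf, h]

-- B's loop returns true iff every still-missing element occurs in the remaining input
theorem altGo_eq_ball (l : List Char) (missing : PySem.Set Char) (hne : missing ≠ []) :
    numsInStringAltGo l missing = decide (∀ d ∈ missing, d ∈ l) := by
  induction l generalizing missing with
  | nil =>
    obtain ⟨d, hd⟩ := List.exists_mem_of_ne_nil missing hne
    simp [numsInStringAltGo]
    exact ⟨d, hd⟩
  | cons ch rest ih =>
    simp only [numsInStringAltGo]
    by_cases hm : (PySem.Set.discard missing ch).isEmpty = true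
    · have hmnil : PySem.Set.discard missing ch = [] := List.isEmpty_iff.mp hm
      have hball : ∀ d ∈ missing, d ∈ ch :: rest := by
        intro d hd
        by_cases hdc : d = ch
        · simp [hdc]
        · have hmem : d ∈ PySem.Set.discard missing ch :=
            (PySem.Set.mem_discard _ _ _).mpr ⟨hd, hdc⟩
          rw [hmnil] at hmem; exact absurd hmem (List.not_mem_nil)
      simp only [hm, if_true]
      symm; rw [decide_eq_true_iff]
      exact hball
    · have hmne : PySem.Set.discard missing ch ≠ [] := by
        intro h; rw [h] at hm; exact hm rfl
      rw [if_neg (by simpa using hm), ih _ hmne, decide_eq_decide]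
      constructor
      · intro h d hd
        rcases eq_or_ne d ch with rfl | hdc
        · exact List.mem_cons_self
        · have hm2 : d ∈ PySem.Set.discard missing ch :=
            (PySem.Set.mem_discard _ _ _).mpr ⟨hd, hdc⟩
          exact List.mem_cons_of_mem _ (h d hm2)
      · intro h d hd
        obtain ⟨hdm, hdc⟩ := (PySem.Set.mem_discard _ _ _).mp hd
        rcases List.mem_cons.mp (h d hdm) with h1 | h1
        · exact absurd h1 hdc
        · exact h1

-- ===== VERDICT =====
theorem numsInString_spec : Claim_equal_numsInString := by
  intro strng _
  unfold Spec_numsInString numsInString numsInString_alt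
  rw [go_eq_all, altGo_eq_ball _ _ (by decide), Bool.eq_iff_iff]
  simp [PySem.Set.mem_ofList]
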